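-- pv_equiv track=rewrite | github.com/ahammadnafiz/Python-UIU | Exercises/Generators Exercise/trace_problem_4.py | conditional_combined_generator
-- ===== SOURCE A (Python) =====
-- def range_generator(n):
--     i = 0
--     while i < n:
--         yield i
--         i += 1
--
-- def filter_generator(predicate, iterable):
--     for item in iterable:
--         if predicate(item):
--             yield item
--
-- def conditional_combined_generator(n):
--     numbers = range_generator(n)
--     filtered_numbers = filter_generator(lambda x: x % 2 == 0, numbers)
--
--     try:
--         while True:
--             value = next(filtered_numbers)
--             if value < 5:
--                 yield f"Small: {value}"
--             else:
--                 yield f"Large: {value}"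
--     except StopIteration:
--         yield "End of sequence"
-- ===== SOURCE B (Python) =====
-- def conditional_combined_generator(n):
--     m = (n + 1) // 2 if n > 0 else 0
--     for k in range(m):
--         v = 2 * k
--         yield ("Small: " if v < 5 else "Large: ") + str(v)
--     yield "End of sequence"
-- ===== Notes on version B (the rewrite author's own statement) =====
-- stated objective: simpler
-- what changed: B computes the number of even values below n in closed form ((n+1)//2) and emits the labels by a direct for-loop over range(m) with v = 2*k, replacing A's range generator, predicate-filter generator and try/except StopIteration drive loop.
import Mathlib
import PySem

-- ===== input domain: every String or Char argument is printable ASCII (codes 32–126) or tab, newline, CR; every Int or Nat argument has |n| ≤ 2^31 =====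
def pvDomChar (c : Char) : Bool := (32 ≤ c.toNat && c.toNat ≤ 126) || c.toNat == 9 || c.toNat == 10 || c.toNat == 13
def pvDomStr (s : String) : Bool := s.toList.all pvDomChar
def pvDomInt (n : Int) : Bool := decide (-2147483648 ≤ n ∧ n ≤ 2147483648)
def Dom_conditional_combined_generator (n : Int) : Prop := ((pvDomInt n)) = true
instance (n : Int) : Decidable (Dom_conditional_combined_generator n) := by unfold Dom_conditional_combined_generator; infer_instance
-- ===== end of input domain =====

-- B counts the evens below n in closed form ((n+1)//2) and maps the label over
-- range(m), replacing A's two helper generators, the even filter and the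
-- try/except drive loop (objective: simpler).

-- ===== PORT A =====
-- A's drive loop: pulls successive values from filter_generator(even, range_generator n),
-- i.e. walks i = 0,1,2,…,n-1, keeps the evens, labels them, then yields the sentinel.
def pvALoop (n i : Int) : List String :=
  if _h : i < n then
    let rest := pvALoop n (i + 1)
    if i % 2 = 0 then
      (if i < 5 then "Small: " ++ PySem.Int.toStr i else "Large: " ++ PySem.Int.toStr i) :: rest
    else rest
  else ["End of sequence"]
termination_by (n - i).toNat
decreasing_by omega

def conditional_combined_generator (n : Int) : List String := pvALoop n 0

-- ===== PORT B =====
-- the label yielded for one even value v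
def pvLabel (v : Int) : String := (if v < 5 then "Small: " else "Large: ") ++ PySem.Int.toStr v

-- B: m = (n+1)//2 if n > 0 else 0; for k in range(m): yield label(2*k); yield sentinel.
def conditional_combined_generator_alt (n : Int) : List String :=
  (PySem.List.pyRange 0 (if 0 < n then PySem.Int.floordiv (n + 1) 2 else 0) 1).map
    (fun k => pvLabel (2 * k)) ++ ["End of sequence"]

-- ===== PRECONDITION & SPEC =====
def Spec_conditional_combined_generator (n : Int) (out : List String) : Prop := out = conditional_combined_generator_alt n
instance (n : Int) (out : List String) : Decidable (Spec_conditional_combined_generator n out) := by unfold Spec_conditional_combined_generator; infer_instance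

-- ===== CLAIM (what is proved, stated in full; the proofs are below) =====
def Claim_equal_conditional_combined_generator : Prop := ∀ (n : Int), Dom_conditional_combined_generator n → Spec_conditional_combined_generator n (conditional_combined_generator n)

-- ===== LEMMAS AND PROOFS =====
-- A's loop from an even index i produces exactly the labels of the
-- ((n-i).toNat + 1)/2 even values i, i+2, … below n, then the sentinel.
lemma pvALoop_closed (fuel : Nat) : ∀ (n i : Int), (n - i).toNat ≤ fuel → i % 2 = 0 →
    pvALoop n i =
      List.map (fun k : Nat => pvLabel (i + 2 * (k : Int))) (List.range (((n - i).toNat + 1) / 2))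
        ++ ["End of sequence"] := by
  induction fuel with
  | zero =>
    intro n i hk he
    have h1 : ¬ i < n := by omega
    have h2 : ((n - i).toNat + 1) / 2 = 0 := by omega
    rw [pvALoop]
    simp [h1, h2]
  | succ fuel ih =>
    intro n i hk he
    by_cases h1 : i < n
    · have hc : ((n - i).toNat + 1) / 2 = (((n - (i + 2)).toNat + 1) / 2) + 1 := by omega
      rw [pvALoop]
      simp only [h1, dif_pos, he, if_pos, hc, List.range_succ_eq_map, List.map_cons,
        List.map_map, List.cons_append]
      refine List.cons_eq_cons.mpr ⟨?_, ?_⟩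
      · have h0 : i + 2 * ((0 : Nat) : Int) = i := by push_cast; ring
        rw [h0]
        unfold pvLabel
        split_ifs <;> rfl
      · have hstep : pvALoop n (i + 1) = pvALoop n (i + 2) := by
          by_cases h2 : i + 1 < n
          · have hodd : ¬ (i + 1) % 2 = 0 := by omega
            rw [pvALoop, dif_pos h2, if_neg hodd]
            congr 1
            ring
          · have h3 : ¬ i + 2 < n := by omega
            rw [pvALoop, dif_neg h2, pvALoop, dif_neg h3]
        rw [hstep, ih n (i + 2) (by omega) (by omega)]
        congr 1
        apply List.map_congr_left
        intro k _
        congr 1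
        push_cast
        ring
    · have h2 : ((n - i).toNat + 1) / 2 = 0 := by omega
      rw [pvALoop]
      simp [h1, h2]

-- ===== VERDICT (by name: the statement is the Claim_ definition above) =====
theorem conditional_combined_generator_spec : Claim_equal_conditional_combined_generator := by
  intro n _
  unfold Spec_conditional_combined_generator conditional_combined_generator
    conditional_combined_generator_alt
  rw [pvALoop_closed (n - 0).toNat n 0 le_rfl rfl]
  have hm : (if 0 < n then PySem.Int.floordiv (n + 1) 2 else 0) = (((n - 0).toNat + 1) / 2 : Nat) := by
    split_ifs with h
    · rw [PySem.Int.floordiv_eq_ediv_of_pos (by omega)]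
      omega
    · omega
  rw [hm, PySem.List.pyRange_one, List.map_map]
  congr 1
  apply List.map_congr_left
  intro k hk
  simp only [Function.comp]
  congr 1
  simp only [List.mem_range] at hk
  omega
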